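-- pv_equiv track=rewrite | github.com/mcomegalletas/AIClassProjects | main.py | hayDuplicados
-- ===== SOURCE A (Python) =====
-- def hayDuplicados(auxArray, usedIndexes):
--     for i in range(len(auxArray)):
--         for j in range(i, len(auxArray)):
--             if i != j and auxArray[i] == auxArray[j]:
--                 if i in usedIndexes:
--                     return j
--                 else:
--                     return i
--     return -1
-- ===== SOURCE B (Python) =====
-- def hayDuplicados(auxArray, usedIndexes):
--     # One reverse pass: nxt maps a value to the smallest index > idx where it occurs;
--     # best ends as (first index with a later duplicate, its first later equal index).
--     nxt = {}
--     best = None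
--     for idx in range(len(auxArray) - 1, -1, -1):
--         v = auxArray[idx]
--         if v in nxt:
--             best = (idx, nxt[v])
--         nxt[v] = idx
--     if best is None:
--         return -1
--     i, j = best
--     return j if i in usedIndexes else i
-- ===== Notes on version B (the rewrite author's own statement) =====
-- stated objective: alternative
-- what changed: Replaces the nested index scan with a single right-to-left pass that maintains a dict from each value to its smallest later index and tracks the (first duplicated index, first later equal index) pair.
import Mathlib
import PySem

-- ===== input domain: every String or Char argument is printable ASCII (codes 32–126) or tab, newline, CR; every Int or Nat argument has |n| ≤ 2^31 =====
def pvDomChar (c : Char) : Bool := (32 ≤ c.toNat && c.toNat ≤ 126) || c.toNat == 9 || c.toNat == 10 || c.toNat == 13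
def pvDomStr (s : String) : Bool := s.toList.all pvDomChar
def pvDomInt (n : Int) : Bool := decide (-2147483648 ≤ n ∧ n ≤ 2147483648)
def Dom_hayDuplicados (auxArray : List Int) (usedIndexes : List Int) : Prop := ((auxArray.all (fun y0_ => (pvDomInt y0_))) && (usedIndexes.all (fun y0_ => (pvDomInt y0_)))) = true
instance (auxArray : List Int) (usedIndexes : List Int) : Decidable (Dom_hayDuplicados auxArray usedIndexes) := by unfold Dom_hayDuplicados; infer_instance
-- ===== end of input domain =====

-- B replaces A's nested index scan by a single right-to-left pass that maintains a
-- dict from each value to its smallest later index (objective: alternative).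

-- ===== PORT A =====
-- inner loop 'for j in range(i, len(auxArray)): …' with its early returns
def pvLoopJ (auxArray usedIndexes : List Int) (i : Int) : List Int → Option Int
  | [] => none
  | j :: js =>
    if i ≠ j ∧ PySem.List.pyGet? auxArray i = PySem.List.pyGet? auxArray j then
      some (if i ∈ usedIndexes then j else i)
    else pvLoopJ auxArray usedIndexes i js

-- outer loop 'for i in range(len(auxArray)): …'
def pvLoopI (auxArray usedIndexes : List Int) : List Int → Int
  | [] => -1
  | i :: is =>
    match pvLoopJ auxArray usedIndexes i (PySem.List.pyRange i (auxArray.length : Int) 1) with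
    | some r => r
    | none => pvLoopI auxArray usedIndexes is

def hayDuplicados (auxArray : List Int) (usedIndexes : List Int) : Int :=
  pvLoopI auxArray usedIndexes (PySem.List.pyRange 0 (auxArray.length : Int) 1)

-- ===== PORT B =====
-- one iteration of B's reverse loop; idx is always a valid index here, so pyGetD is exact
def pvStep (auxArray : List Int) (s : PySem.Dict Int Int × Option (Int × Int)) (idx : Int) :
    PySem.Dict Int Int × Option (Int × Int) :=
  let v := PySem.List.pyGetD auxArray idx 0
  let best := match s.1.get? v with
    | some j => some (idx, j)
    | none => s.2
  (s.1.insert v idx, best)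

def hayDuplicados_alt (auxArray : List Int) (usedIndexes : List Int) : Int :=
  match ((PySem.List.pyRange ((auxArray.length : Int) - 1) (-1) (-1)).foldl
      (fun s idx => pvStep auxArray s idx) (PySem.Dict.empty, none)).2 with
  | none => -1
  | some (i, j) => if i ∈ usedIndexes then j else i

-- ===== PRECONDITION & SPEC =====
def Spec_hayDuplicados (auxArray : List Int) (usedIndexes : List Int) (out : Int) : Prop := out = hayDuplicados_alt auxArray usedIndexes
instance (auxArray : List Int) (usedIndexes : List Int) (out : Int) : Decidable (Spec_hayDuplicados auxArray usedIndexes out) := by unfold Spec_hayDuplicados; infer_instance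

-- ===== CLAIM (what is proved, stated in full; the proofs are below) =====
def Claim_equal_hayDuplicados : Prop := ∀ (auxArray : List Int) (usedIndexes : List Int), Dom_hayDuplicados auxArray usedIndexes → Spec_hayDuplicados auxArray usedIndexes (hayDuplicados auxArray usedIndexes)

-- ===== LEMMAS AND PROOFS =====

-- common specification: first index i (counting from k) whose value recurs later,
-- paired with the first later equal index
def pvFind (k : Int) : List Int → Option (Int × Int)
  | [] => none
  | v :: rest =>
    match rest.findIdx? (· == v) with
    | some d => some (k, k + 1 + (d : Int))
    | none => pvFind (k + 1) rest

-- ---- A's side ----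

lemma pvLoopJ_range (a u : List Int) (i m : Nat) (hi : i < a.length) (him : i < m) :
    pvLoopJ a u (i : Int) (PySem.List.pyRange (m : Int) (a.length : Int) 1) =
      ((a.drop m).findIdx? (· == a[i])).map
        (fun d => if (i : Int) ∈ u then (m : Int) + (d : Int) else (i : Int)) := by
  induction hm : a.length - m generalizing m with
  | zero =>
    have hml : a.length ≤ m := by omega
    rw [PySem.List.pyRange_one_eq_nil (by exact_mod_cast hml)]
    rw [List.drop_eq_nil_of_le hml]
    simp [pvLoopJ]
  | succ t ih =>
    have hmn : m < a.length := by omega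
    rw [PySem.List.pyRange_one_cons (by exact_mod_cast hmn)]
    have hdrop : a.drop m = a[m] :: a.drop (m + 1) := by
      rw [List.drop_eq_getElem_cons hmn]
    rw [hdrop]
    simp only [pvLoopJ, List.findIdx?_cons]
    by_cases he : a[m] = a[i]
    · have hcond : (i : Int) ≠ (m : Int) ∧
          PySem.List.pyGet? a (i : Int) = PySem.List.pyGet? a (m : Int) := by
        constructor
        · intro h; omega
        · simp [hi, hmn, he]
      rw [if_pos hcond]
      have hbeq : (a[m] == a[i]) = true := by simp [he]
      rw [hbeq]
      simp
    · have hcond : ¬((i : Int) ≠ (m : Int) ∧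
          PySem.List.pyGet? a (i : Int) = PySem.List.pyGet? a (m : Int)) := by
        intro ⟨_, h2⟩
        simp [hi, hmn] at h2
        exact he h2.symm
      rw [if_neg hcond]
      have : (m : Int) + 1 = ((m + 1 : Nat) : Int) := by push_cast; ring
      rw [this, ih (m + 1) (by omega) (by omega)]
      have hne : (a[m] == a[i]) = false := by simp [he]
      rw [hne]
      cases hfi2 : (a.drop (m + 1)).findIdx? (fun x => x == a[i]) with
      | none => simp
      | some d =>
        by_cases hu : ((i : Int) ∈ u) <;> simp [hu]
        ring

lemma pvLoopI_range (a u : List Int) (k : Nat) :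
    pvLoopI a u (PySem.List.pyRange (k : Int) (a.length : Int) 1) =
      (match pvFind (k : Int) (a.drop k) with
       | none => -1
       | some (i, j) => if i ∈ u then j else i) := by
  induction hm : a.length - k generalizing k with
  | zero =>
    have hkl : a.length ≤ k := by omega
    rw [PySem.List.pyRange_one_eq_nil (by exact_mod_cast hkl)]
    rw [List.drop_eq_nil_of_le hkl]
    simp [pvLoopI, pvFind]
  | succ t ih =>
    have hkn : k < a.length := by omega
    rw [PySem.List.pyRange_one_cons (by exact_mod_cast hkn)]
    have hdrop : a.drop k = a[k] :: a.drop (k + 1) := by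
      rw [List.drop_eq_getElem_cons hkn]
    rw [hdrop]
    simp only [pvLoopI]
    have hskip : pvLoopJ a u (k:Int) (PySem.List.pyRange (k:Int) (a.length:Int) 1)
        = pvLoopJ a u (k:Int) (PySem.List.pyRange ((k:Int)+1) (a.length:Int) 1) := by
      rw [PySem.List.pyRange_one_cons (by exact_mod_cast hkn)]
      simp [pvLoopJ]
    have hcast : (k:Int)+1 = ((k+1:Nat):Int) := by push_cast; ring
    rw [hskip, hcast, pvLoopJ_range a u k (k+1) hkn (by omega)]
    simp only [pvFind]
    cases hfi : (a.drop (k+1)).findIdx? (fun x => x == a[k]) with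
    | some d =>
      by_cases hu : ((k : Int) ∈ u) <;> simp [hu]
    | none =>
      rw [hcast]
      exact ih (k + 1) (by omega)
  
-- ---- B's side ----

lemma pvFold_invariant (a : List Int) (k : Nat) :
    (∀ w : Int,
      ((PySem.List.pyRange (k : Int) (a.length : Int) 1).foldr
          (fun idx s => pvStep a s idx) (PySem.Dict.empty, none)).1.get? w =
        ((a.drop k).findIdx? (· == w)).map (fun d => ((k : Int) + (d : Int)))) ∧
    ((PySem.List.pyRange (k : Int) (a.length : Int) 1).foldr
          (fun idx s => pvStep a s idx) (PySem.Dict.empty, none)).2 =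
        pvFind (k : Int) (a.drop k) := by
  induction hm : a.length - k generalizing k with
  | zero =>
    have hkl : a.length ≤ k := by omega
    rw [PySem.List.pyRange_one_eq_nil (by exact_mod_cast hkl), List.drop_eq_nil_of_le hkl]
    constructor
    · intro w
      simp [PySem.Dict.get?, PySem.Dict.empty]
    · simp [pvFind]
  | succ t ih =>
    have hkn : k < a.length := by omega
    have hdrop : a.drop k = a[k] :: a.drop (k + 1) := List.drop_eq_getElem_cons hkn
    have hcast : (k : Int) + 1 = ((k + 1 : Nat) : Int) := by push_cast; ring
    rw [PySem.List.pyRange_one_cons (by exact_mod_cast hkn), List.foldr_cons, hdrop, hcast]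
    obtain ⟨ih1, ih2⟩ := ih (k + 1) (by omega)
    set s' := (PySem.List.pyRange ((k + 1 : Nat) : Int) (a.length : Int) 1).foldr
        (fun idx s => pvStep a s idx) (PySem.Dict.empty, none) with hs'
    have hv : PySem.List.pyGetD a (k : Int) 0 = a[k] := by
      simp [List.getD_eq_getElem?_getD, hkn]
    constructor
    · intro w
      simp only [pvStep, hv, List.findIdx?_cons]
      by_cases hw : a[k] = w
      · rw [hw, PySem.Dict.get?_insert_self]
        simp
      · rw [PySem.Dict.get?_insert_of_ne _ _ (by exact fun h => hw h.symm), ih1 w]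
        have hne : (a[k] == w) = false := by simp [hw]
        rw [hne]
        cases (a.drop (k + 1)).findIdx? (fun x => x == w) with
        | none => simp
        | some d =>
          simp
          ring
    · simp only [pvStep, hv, pvFind]
      rw [ih1 a[k]]
      cases hfi : (a.drop (k + 1)).findIdx? (fun x => x == a[k]) with
      | none =>
        show s'.2 = pvFind ((k : Int) + 1) (a.drop (k + 1))
        rw [ih2, ← hcast]
      | some d => simp

-- ===== VERDICT (by name: the statement is the Claim_ definition above) =====
theorem hayDuplicados_spec : Claim_equal_hayDuplicados := by
  intro a u _
  unfold Spec_hayDuplicados hayDuplicados hayDuplicados_alt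
  have hrev : PySem.List.pyRange ((a.length : Int) - 1) (-1) (-1)
      = (PySem.List.pyRange 0 (a.length : Int) 1).reverse := by
    rw [PySem.List.pyRange_neg_one_eq_reverse]
    norm_num
  rw [hrev, List.foldl_reverse]
  have hinv := (pvFold_invariant a 0).2
  have hA := pvLoopI_range a u 0
  simp only [Nat.cast_zero, List.drop_zero] at hinv hA
  rw [hA, hinv]
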